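-- pv_equiv track=rewrite | github.com/Ifthikar20/plays-study-backend-auth | study/services/ai_service.py | _topic_title
-- ===== SOURCE A (Python) =====
-- def _topic_title(chunk: list, idx: int) -> str:
--     """Pick a short, readable title from a chunk of sentences."""
--     # Try to find a capitalised noun phrase near the start.
--     first = chunk[0].strip()
--     words = first.split()
--     # Prefer the first meaningful capitalised run (e.g. "Calculus Fundamentals")
--     cap_run = []
--     for w in words[:12]:
--         stripped = w.strip(',.:;')
--         if stripped and stripped[0].isupper() and stripped.lower() not in {'the', 'a', 'an', 'and', 'or', 'but'}:
--             cap_run.append(stripped)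
--             if len(cap_run) >= 4:
--                 break
--         elif cap_run:
--             break
--     if cap_run:
--         return f'Section {idx + 1}: ' + ' '.join(cap_run)
--     # Fallback: first six words
--     return f'Section {idx + 1}: ' + ' '.join(words[:6]).rstrip(',.:;')
-- ===== SOURCE B (Python) =====
-- def _topic_title(chunk: list, idx: int) -> str:
--     """Pick a short, readable title from a chunk of sentences."""
--     first = chunk[0].strip()
--     words = first.split()
--     window = words[:12]
--
--     def ok(w):
--         s = w.strip(',.:;')
--         return bool(s) and s[0].isupper() and s.lower() not in ('the', 'a', 'an', 'and', 'or', 'but')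
--
--     flags = [ok(w) for w in window]
--     # locate the first qualifying word ...
--     start = 0
--     while start < len(flags) and not flags[start]:
--         start += 1
--     # ... then extend the run (at most 4 words)
--     end = start
--     while end < len(flags) and flags[end] and end - start < 4:
--         end += 1
--     run = [w.strip(',.:;') for w in window[start:end]]
--     if run:
--         return 'Section {}: '.format(idx + 1) + ' '.join(run)
--     return 'Section {}: '.format(idx + 1) + ' '.join(words[:6]).rstrip(',.:;')
-- ===== Notes on version B (the rewrite author's own statement) =====
-- stated objective: alternative
-- what changed: A's single accumulate-and-break loop (append stripped qualifying words, stop at 4 or at the first non-qualifying word after the run starts) is replaced by a two-pass locate-then-extend scheme: precompute a qualification flag per word, advance an index past the leading non-qualifying words, extend a second index over the qualifying run capped at 4, then slice and strip that window.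
-- outside the precondition, e.g. on _topic_title([], 0): A raises IndexError, B raises IndexError
import Mathlib
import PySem

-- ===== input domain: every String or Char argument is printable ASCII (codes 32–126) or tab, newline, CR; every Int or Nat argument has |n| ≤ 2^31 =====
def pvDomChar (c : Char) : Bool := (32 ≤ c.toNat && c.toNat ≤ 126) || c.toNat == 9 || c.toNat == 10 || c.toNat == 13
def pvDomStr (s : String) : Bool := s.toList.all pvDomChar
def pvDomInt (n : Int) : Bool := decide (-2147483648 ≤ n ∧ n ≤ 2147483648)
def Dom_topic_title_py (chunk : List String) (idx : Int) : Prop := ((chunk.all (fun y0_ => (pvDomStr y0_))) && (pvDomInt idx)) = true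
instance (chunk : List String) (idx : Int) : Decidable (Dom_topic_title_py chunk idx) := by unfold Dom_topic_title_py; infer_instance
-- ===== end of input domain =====

-- B replaces A's single accumulate-and-break loop by a two-pass locate-then-extend
-- over a precomputed flag list (same output; objective: alternative decomposition).


-- shared primitives (both Pythons call the same built-ins / write the same predicate)
-- w.strip(',.:;')
def pvStrip (w : String) : String := PySem.Str.stripChars w ",.:;"

-- s.rstrip(',.:;') — hand port (PySem has no rstrip-with-chars): drop trailing
-- characters belonging to ",.:;"; exact for this fixed ASCII char set.
def pvRstrip (s : String) : String :=
  String.ofList ((s.toList.reverse.dropWhile (fun c => c ∈ [',', '.', ':', ';'])).reverse)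

-- stripped and stripped[0].isupper() and stripped.lower() not in {'the','a','an','and','or','but'}
def pvOk (s : String) : Bool :=
  match s.toList with
  | [] => false
  | c :: _ => PySem.Chars.isupper c &&
      !(["the", "a", "an", "and", "or", "but"].contains (PySem.Str.lower s))

-- ===== PORT A =====
-- A's loop: skip while cap_run is empty, append stripped qualifying words, break
-- at 4 or at the first non-qualifying word once the run has started.
def pvLoopA : List String → List String → List String
  | [], acc => acc
  | w :: rest, acc =>
    let stripped := pvStrip w
    if pvOk stripped then
      let acc' := acc ++ [stripped]
      if 4 ≤ acc'.length then acc' else pvLoopA rest acc'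
    else
      if acc.isEmpty then pvLoopA rest acc else acc

def topic_title_py (chunk : List String) (idx : Int) : String :=
  match PySem.List.pyGet? chunk 0 with
  | none => ""      -- unreachable under Pre_ (Python raises IndexError on empty chunk)
  | some c0 =>
    let first := PySem.Str.strip c0
    let words := PySem.Str.split₀ first
    let cap_run := pvLoopA (PySem.List.slice words none (some 12)) []
    if !cap_run.isEmpty then
      "Section " ++ PySem.Int.toStr (idx + 1) ++ ": " ++ PySem.Str.join " " cap_run
    else
      "Section " ++ PySem.Int.toStr (idx + 1) ++ ": " ++
        pvRstrip (PySem.Str.join " " (PySem.List.slice words none (some 6)))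

-- ===== PORT B =====
-- while start < len(flags) and not flags[start]: start += 1
def pvFindStart : List Bool → Nat
  | [] => 0
  | f :: rest => if f then 0 else pvFindStart rest + 1

-- while end < len(flags) and flags[end] and end - start < 4: end += 1   (count = end - start)
def pvRunCount : List Bool → Nat → Nat
  | [], _ => 0
  | f :: rest, cap => if f && 0 < cap then pvRunCount rest (cap - 1) + 1 else 0

def topic_title_py_alt (chunk : List String) (idx : Int) : String :=
  match PySem.List.pyGet? chunk 0 with
  | none => ""      -- unreachable under Pre_
  | some c0 =>
    let first := PySem.Str.strip c0
    let words := PySem.Str.split₀ first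
    let window := PySem.List.slice words none (some 12)
    let flags := window.map (fun w => pvOk (pvStrip w))
    let start := pvFindStart flags
    let stop := start + pvRunCount (flags.drop start) 4
    let run := (PySem.List.slice window (some (start : Int)) (some (stop : Int))).map pvStrip
    if !run.isEmpty then
      "Section " ++ PySem.Int.toStr (idx + 1) ++ ": " ++ PySem.Str.join " " run
    else
      "Section " ++ PySem.Int.toStr (idx + 1) ++ ": " ++
        pvRstrip (PySem.Str.join " " (PySem.List.slice words none (some 6)))

-- ===== PRECONDITION & SPEC =====
-- Python A evaluates chunk[0]; it raises IndexError exactly when chunk is empty.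
def Pre_topic_title_py (chunk : List String) (idx : Int) : Prop := chunk ≠ []
instance (chunk : List String) (idx : Int) : Decidable (Pre_topic_title_py chunk idx) := by
  unfold Pre_topic_title_py; infer_instance

def pvWitness_topic_title_py : List String × Int := (["Calculus Fundamentals: the basics"], 0)

def Spec_topic_title_py (chunk : List String) (idx : Int) (out : String) : Prop := out = topic_title_py_alt chunk idx
instance (chunk : List String) (idx : Int) (out : String) : Decidable (Spec_topic_title_py chunk idx out) := by unfold Spec_topic_title_py; infer_instance

-- ===== CLAIM (what is proved, stated in full; the proofs are below) =====
def Claim_equal_topic_title_py : Prop := ∀ (chunk : List String) (idx : Int), Dom_topic_title_py chunk idx → Pre_topic_title_py chunk idx → Spec_topic_title_py chunk idx (topic_title_py chunk idx)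

-- ===== LEMMAS AND PROOFS =====

-- the canonical value both loops compute: strip the run of ok-words, capped
def pvCollect : List String → Nat → List String
  | [], _ => []
  | w :: rest, cap =>
    if pvOk (pvStrip w) && 0 < cap then pvStrip w :: pvCollect rest (cap - 1) else []

lemma pvLoopA_collect : ∀ (ws acc : List String), acc ≠ [] → acc.length < 4 →
    pvLoopA ws acc = acc ++ pvCollect ws (4 - acc.length) := by
  intro ws
  induction ws with
  | nil => intro acc _ _; simp [pvLoopA, pvCollect]
  | cons w rest ih =>
    intro acc hne hlt
    simp only [pvLoopA, pvCollect]
    by_cases hok : pvOk (pvStrip w)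
    · simp only [hok, if_pos, Bool.true_and]
      have hpos : 0 < 4 - acc.length := by omega
      by_cases h4 : 4 ≤ (acc ++ [pvStrip w]).length
      · have : acc.length = 3 := by simp at h4 ⊢; omega
        rw [if_pos h4]
        have hc : pvCollect rest 0 = [] := by cases rest <;> simp [pvCollect]
        simp [this, hc]
      · have hlen : (acc ++ [pvStrip w]).length < 4 := by omega
        rw [if_neg h4, ih _ (by simp) hlen]
        simp only [List.length_append, List.length_cons, List.length_nil]
        have : 4 - (acc.length + 1) = 4 - acc.length - 1 := by omega
        simp [hpos, this]
    · simp [hok, List.isEmpty_iff, hne]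

lemma pvLoopA_start : ∀ (ws : List String),
    pvLoopA ws [] = pvCollect (ws.dropWhile (fun w => !pvOk (pvStrip w))) 4 := by
  intro ws
  induction ws with
  | nil => simp [pvLoopA, pvCollect]
  | cons w rest ih =>
    by_cases hok : pvOk (pvStrip w)
    · have hL : pvLoopA (w :: rest) [] = pvLoopA rest [pvStrip w] := by
        simp [pvLoopA, hok]
      have hR : (w :: rest).dropWhile (fun w => !pvOk (pvStrip w)) = w :: rest := by
        simp [List.dropWhile_cons, hok]
      rw [hL, hR, pvLoopA_collect rest [pvStrip w] (by simp) (by simp)]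
      simp [pvCollect, hok]
    · simpa [pvLoopA, hok, List.dropWhile_cons] using ih

lemma pvFindStart_drop : ∀ (ws : List String),
    ws.drop (pvFindStart (ws.map (fun w => pvOk (pvStrip w)))) =
      ws.dropWhile (fun w => !pvOk (pvStrip w)) := by
  intro ws
  induction ws with
  | nil => simp
  | cons w rest ih =>
    by_cases hok : pvOk (pvStrip w) <;>
      simp [pvFindStart, hok, List.dropWhile_cons, ih]

lemma pvRunCount_take : ∀ (ws : List String) (cap : Nat),
    (ws.take (pvRunCount (ws.map (fun w => pvOk (pvStrip w))) cap)).map pvStrip =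
      pvCollect ws cap := by
  intro ws
  induction ws with
  | nil => intro cap; simp [pvRunCount, pvCollect]
  | cons w rest ih =>
    intro cap
    by_cases hok : pvOk (pvStrip w)
    · by_cases hcap : 0 < cap
      · simp [pvRunCount, pvCollect, hok, hcap, ih]
      · simp [pvRunCount, pvCollect, hok, hcap]
    · simp [pvRunCount, pvCollect, hok]

-- the run B slices out equals the run A's loop accumulates
lemma pvRun_eq (window : List String) :
    (PySem.List.slice window (some ((pvFindStart (window.map (fun w => pvOk (pvStrip w)))) : Int))
        (some ((pvFindStart (window.map (fun w => pvOk (pvStrip w))) +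
          pvRunCount ((window.map (fun w => pvOk (pvStrip w))).drop
            (pvFindStart (window.map (fun w => pvOk (pvStrip w))))) 4 : Nat) : Int))).map pvStrip
      = pvLoopA window [] := by
  set flags := window.map (fun w => pvOk (pvStrip w)) with hflags
  set start := pvFindStart flags with hstart
  rw [PySem.List.slice_toNat, hflags]
  have hdropmap : (window.map (fun w => pvOk (pvStrip w))).drop start =
      (window.drop start).map (fun w => pvOk (pvStrip w)) := by
    simp [List.map_drop]
  rw [hdropmap]
  have ha : (((start + pvRunCount ((window.drop start).map (fun w => pvOk (pvStrip w))) 4 : Nat) : Int)).toNat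
        - (start : Int).toNat = pvRunCount ((window.drop start).map (fun w => pvOk (pvStrip w))) 4 := by
    omega
  rw [ha, Int.toNat_natCast, pvRunCount_take, hstart, hflags, pvFindStart_drop, pvLoopA_start]
  · omega
  · positivity

-- ===== VERDICT (by name: the statement is the Claim_ definition above) =====
theorem topic_title_py_spec : Claim_equal_topic_title_py := by
  intro chunk idx _ hpre
  match chunk with
  | [] => exact absurd rfl hpre
  | c0 :: rest =>
    unfold Spec_topic_title_py topic_title_py topic_title_py_alt
    have h0 : PySem.List.pyGet? (c0 :: rest) (0 : Int) = some c0 := by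
      rw [show (0 : Int) = ((0 : Nat) : Int) from rfl, PySem.List.pyGet?_natCast]
      simp
    simp only [h0]
    rw [pvRun_eq]
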